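-- pv_equiv track=rewrite | github.com/crusom/matury-informatyka | 2019/zad1.py | szukaj_bin
-- ===== SOURCE A (Python) =====
-- def szukaj_bin(A):
--     l = 0
--     p = len(A) - 1
--     while l < p:
--         s = (l + p) // 2
--         if A[s] % 2 != 0:
--             l = s + 1
--         else:
--             p = s
--     return A[p]
-- ===== SOURCE B (Python) =====
-- def szukaj_bin(A):
--     if len(A) <= 1:
--         return A[0]
--     m = (len(A) - 1) // 2
--     if A[m] % 2 != 0:
--         return szukaj_bin(A[m + 1:])
--     return szukaj_bin(A[:m + 1])
-- ===== Notes on version B (the rewrite author's own statement) =====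
-- stated objective: alternative
-- what changed: A's imperative while loop over an index pair (l, p) is replaced by structural recursion on list slices: B recurses on A[m+1:] or A[:m+1] with m = (len(A)-1)//2, making the same midpoint/parity decisions with no index bookkeeping.
-- outside the precondition, e.g. on szukaj_bin([]): A raises IndexError, B raises IndexError
import Mathlib
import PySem

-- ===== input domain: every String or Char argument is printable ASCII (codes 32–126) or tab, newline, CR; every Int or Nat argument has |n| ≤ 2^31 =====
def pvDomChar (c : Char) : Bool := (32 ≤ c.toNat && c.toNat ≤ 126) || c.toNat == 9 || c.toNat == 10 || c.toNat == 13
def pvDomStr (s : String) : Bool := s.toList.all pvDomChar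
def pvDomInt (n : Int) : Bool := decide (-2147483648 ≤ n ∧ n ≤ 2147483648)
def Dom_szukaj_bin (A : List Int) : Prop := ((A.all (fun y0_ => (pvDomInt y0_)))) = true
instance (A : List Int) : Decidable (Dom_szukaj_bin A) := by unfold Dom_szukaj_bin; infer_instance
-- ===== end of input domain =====

-- B replaces A's index-pair while loop by structural recursion on list slices (same midpoint
-- decisions, no index bookkeeping); objective: alternative decomposition, not speed.

-- ===== PORT A =====
-- midpoint bounds used by the loop's termination argument
theorem pvMid_lt {l p : Int} (h : l < p) : PySem.Int.floordiv (l + p) 2 < p := by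
  rw [PySem.Int.floordiv_lt_iff_lt_mul (by omega)]; omega

theorem pvMid_ge {l p : Int} (h : l ≤ p) : l ≤ PySem.Int.floordiv (l + p) 2 :=
  (PySem.Int.floordiv_two_mid_bounds h).1

theorem pvMid_ge0 {p : Int} (h : 0 ≤ p) : 0 ≤ PySem.Int.floordiv p 2 := by
  have := pvMid_ge h; simpa using this

theorem pvMid_lt0 {p : Int} (h : 0 < p) : PySem.Int.floordiv p 2 < p := by
  have := pvMid_lt (l := 0) (p := p) h; simpa using this

-- the while loop of A, on loop state (l, p); A[s] is in range on every admitted input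
def szukajLoop (A : List Int) (l p : Int) : Int :=
  if h : l < p then
    let s := PySem.Int.floordiv (l + p) 2
    if PySem.Int.mod (PySem.List.pyGetD A s 0) 2 ≠ 0 then
      szukajLoop A (s + 1) p
    else
      szukajLoop A l s
  else
    PySem.List.pyGetD A p 0
termination_by (p - l).toNat
decreasing_by
  · have h1 := pvMid_ge (le_of_lt h); omega
  · have h2 := pvMid_lt h; omega

def szukaj_bin (A : List Int) : Int :=
  szukajLoop A 0 ((A.length : Int) - 1)

-- ===== PORT B =====
def szukaj_bin_alt (A : List Int) : Int :=
  if (A.length : Int) ≤ 1 then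
    PySem.List.pyGetD A 0 0
  else
    let m := PySem.Int.floordiv ((A.length : Int) - 1) 2
    if PySem.Int.mod (PySem.List.pyGetD A m 0) 2 ≠ 0 then
      szukaj_bin_alt (PySem.List.slice A (some (m + 1)) none)
    else
      szukaj_bin_alt (PySem.List.slice A none (some (m + 1)))
termination_by A.length
decreasing_by
  · have hm : 0 ≤ PySem.Int.floordiv ((A.length : Int) - 1) 2 := pvMid_ge0 (by omega)
    rw [PySem.List.slice_from A (by omega)]
    simp only [List.length_drop]; omega
  · have hm : PySem.Int.floordiv ((A.length : Int) - 1) 2 < (A.length : Int) - 1 :=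
      pvMid_lt0 (by omega)
    have hm0 : 0 ≤ PySem.Int.floordiv ((A.length : Int) - 1) 2 := pvMid_ge0 (by omega)
    rw [PySem.List.slice_to A (by omega)]
    simp only [List.length_take]; omega

-- ===== PRECONDITION & SPEC =====
-- Pre_ excludes only the empty list, on which A (A[-1]) and B (A[0]) both raise IndexError.
def Pre_szukaj_bin (A : List Int) : Prop := A ≠ []
instance (A : List Int) : Decidable (Pre_szukaj_bin A) := by unfold Pre_szukaj_bin; infer_instance
def pvWitness_szukaj_bin : List Int := [3, 1, 2, 4]

def Spec_szukaj_bin (A : List Int) (out : Int) : Prop := out = szukaj_bin_alt A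
instance (A : List Int) (out : Int) : Decidable (Spec_szukaj_bin A out) := by unfold Spec_szukaj_bin; infer_instance

-- ===== CLAIM (what is proved, stated in full; the proofs are below) =====
def Claim_equal_szukaj_bin : Prop := ∀ (A : List Int), Dom_szukaj_bin A → Pre_szukaj_bin A → Spec_szukaj_bin A (szukaj_bin A)

-- ===== LEMMAS AND PROOFS =====

-- the absolute midpoint is the window start plus the relative midpoint
theorem pvMid_split {l p : Int} (_h : l ≤ p) :
    PySem.Int.floordiv (l + p) 2 = l + PySem.Int.floordiv (p - l) 2 := by
  have hq := PySem.Int.floordiv_mul_add_mod (p - l) 2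
  have hr0 := PySem.Int.mod_nonneg (p - l) (b := 2) (by omega)
  have hr1 := PySem.Int.mod_lt (p - l) (b := 2) (by omega)
  rw [PySem.Int.floordiv_eq_iff_of_pos (a := l + p) (b := 2) (by omega)]
  omega

-- the loop on window [l, p] computes B's recursion on the sublist A[l : p+1]
theorem pvKey (n : Nat) (A : List Int) (l p : Int)
    (hn : (p - l).toNat = n) (hl : 0 ≤ l) (hlp : l ≤ p) (hp : p < (A.length : Int)) :
    szukajLoop A l p = szukaj_bin_alt ((A.drop l.toNat).take (p + 1 - l).toNat) := by
  induction n using Nat.strong_induction_on generalizing A l p with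
  | _ n ih =>
  have hlen : (((A.drop l.toNat).take (p + 1 - l).toNat).length : Int) = p + 1 - l := by
    simp only [List.length_take, List.length_drop]; omega
  by_cases hcase : l < p
  · -- loop iterates
    rw [szukajLoop]
    simp only [dif_pos hcase]
    set s := PySem.Int.floordiv (l + p) 2 with hs
    have hsl : l ≤ s := pvMid_ge (le_of_lt hcase)
    have hsp : s < p := pvMid_lt hcase
    -- unfold one step of B on the sublist
    rw [szukaj_bin_alt]
    have hgt : ¬ ((((A.drop l.toNat).take (p + 1 - l).toNat).length : Int) ≤ 1) := by omega
    simp only [if_neg hgt]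
    have hmid : PySem.Int.floordiv ((((A.drop l.toNat).take (p + 1 - l).toNat).length : Int) - 1) 2
        = s - l := by
      rw [hlen, hs, pvMid_split (le_of_lt hcase)]; ring_nf
    rw [hmid]
    -- the probed element is the same
    have hget : PySem.List.pyGetD ((A.drop l.toNat).take (p + 1 - l).toNat) (s - l) 0
        = PySem.List.pyGetD A s 0 := by
      rw [PySem.List.pyGetD_eq_getElem ((A.drop l.toNat).take (p + 1 - l).toNat) 0 (by omega) (by omega),
          PySem.List.pyGetD_eq_getElem A 0 (by omega) (by omega)]
      rw [List.getElem_take, List.getElem_drop]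
      congr 1; omega
    rw [hget]
    by_cases hodd : PySem.Int.mod (PySem.List.pyGetD A s 0) 2 ≠ 0
    · simp only [if_pos hodd]
      have hsub : PySem.List.slice ((A.drop l.toNat).take (p + 1 - l).toNat) (some (s - l + 1)) none
          = (A.drop (s + 1).toNat).take (p + 1 - (s + 1)).toNat := by
        rw [PySem.List.slice_from _ (by omega)]
        rw [List.drop_take, List.drop_drop]
        congr 1
        · omega
        · congr 1; omega
      rw [hsub]
      exact ih (p - (s + 1)).toNat (by omega) A (s + 1) p rfl (by omega) (by omega) hp
    · simp only [if_neg hodd]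
      have hsub : PySem.List.slice ((A.drop l.toNat).take (p + 1 - l).toNat) none (some (s - l + 1))
          = (A.drop l.toNat).take (s + 1 - l).toNat := by
        rw [PySem.List.slice_to _ (by omega)]
        rw [List.take_take]
        congr 1; omega
      rw [hsub]
      exact ih (s - l).toNat (by omega) A l s rfl hl (by omega) (by omega)
  · -- l = p: loop exits, B is at its base case
    have hlp' : l = p := le_antisymm hlp (le_of_not_gt hcase)
    subst hlp'
    rw [szukajLoop]
    simp only [dif_neg hcase]
    rw [szukaj_bin_alt]
    have h1 : (((A.drop l.toNat).take (l + 1 - l).toNat).length : Int) ≤ 1 := by omega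
    simp only [if_pos h1]
    rw [PySem.List.pyGetD_eq_getElem A 0 (by omega) (by omega),
        PySem.List.pyGetD_eq_getElem ((A.drop l.toNat).take (l + 1 - l).toNat) 0 (by omega) (by omega)]
    rw [List.getElem_take, List.getElem_drop]
    simp

-- ===== VERDICT (by name: the statement is the Claim_ definition above) =====
theorem szukaj_bin_spec : Claim_equal_szukaj_bin := by
  intro A _ hpre
  have hne : A ≠ [] := hpre
  have hlen : 0 < A.length := List.length_pos_iff.mpr hne
  unfold Spec_szukaj_bin szukaj_bin
  have h := pvKey ((A.length : Int) - 1 - 0).toNat A 0 ((A.length : Int) - 1)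
    rfl (by omega) (by omega) (by omega)
  rw [h]
  congr 1
  simp only [Int.toNat_zero, List.drop_zero]
  rw [List.take_of_length_le (by omega)]
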